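-- pv_equiv track=rewrite | github.com/2454760302hui/self-auto-gui | browser-use-main-debug/browser-use-main/browser_use/config.py | _collect_prefixed_profiles
-- ===== SOURCE A (Python) =====
-- from collections.abc import Mapping
-- from typing import Any
--
-- def _normalize_profile_name(name: str) -> str:
-- 	return name.strip().lower().replace('-', '_').replace(' ', '_')
--
-- def _collect_prefixed_profiles(prefix: str, env: Mapping[str, str]) -> dict[str, dict[str, Any]]:
-- 	profiles: dict[str, dict[str, Any]] = {}
-- 	prefix_upper = prefix.upper()
--
-- 	for key, value in env.items():
-- 		if not key.startswith(prefix_upper):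
-- 			continue
-- 		remainder = key[len(prefix_upper) :]
-- 		if '_' not in remainder:
-- 			continue
-- 		profile_name, field_name = remainder.split('_', 1)
-- 		profile_name = _normalize_profile_name(profile_name)
-- 		field_name = field_name.lower()
-- 		profiles.setdefault(profile_name, {})[field_name] = value
--
-- 	return profiles
-- ===== SOURCE B (Python) =====
-- def _parse_profile_entry(prefix_upper, key, value):
--     """Return (normalized_profile, field, value) if key matches, else None."""
--     if not key.startswith(prefix_upper):
--         return None
--     remainder = key[len(prefix_upper):]
--     if '_' not in remainder:
--         return None
--     name, field = remainder.split('_', 1)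
--     name = name.strip().lower().replace('-', '_').replace(' ', '_')
--     return name, field.lower(), value
--
--
-- def _collect_prefixed_profiles(prefix, env):
--     prefix_upper = prefix.upper()
--     triples = [t for t in (_parse_profile_entry(prefix_upper, k, v) for k, v in env.items()) if t is not None]
--     names = list(dict.fromkeys(n for n, _, _ in triples))
--     return {n: {f: v for m, f, v in triples if m == n} for n in names}
-- ===== Notes on version B (the rewrite author's own statement) =====
-- stated objective: alternative
-- what changed: A builds the nested dict incrementally with setdefault inside one env loop; B first parses env into a flat list of (profile, field, value) triples via a helper, then derives the profile-name order with dict.fromkeys and builds each profile's field dict by a per-profile filter comprehension (last-wins preserved).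
import Mathlib
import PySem

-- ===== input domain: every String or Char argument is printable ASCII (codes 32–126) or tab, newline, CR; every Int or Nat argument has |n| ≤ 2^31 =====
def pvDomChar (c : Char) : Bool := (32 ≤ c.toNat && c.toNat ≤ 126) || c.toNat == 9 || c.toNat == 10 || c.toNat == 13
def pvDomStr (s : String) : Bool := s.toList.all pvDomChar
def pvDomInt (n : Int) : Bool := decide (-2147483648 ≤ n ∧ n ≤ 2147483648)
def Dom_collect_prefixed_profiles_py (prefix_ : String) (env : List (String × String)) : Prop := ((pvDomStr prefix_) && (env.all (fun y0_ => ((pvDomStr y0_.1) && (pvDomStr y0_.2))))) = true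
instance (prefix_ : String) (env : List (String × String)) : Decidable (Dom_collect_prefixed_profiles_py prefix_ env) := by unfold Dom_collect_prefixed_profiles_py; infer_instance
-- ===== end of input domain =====

-- B re-decomposes A's single setdefault loop as parse-all-triples, then group per first-occurrence
-- profile name (objective: alternative decomposition, same result; not faster).

-- ===== PORT A =====
-- _normalize_profile_name (A-side helper)
def normalize_profile_name_py (name : String) : String :=
  PySem.Str.replace (PySem.Str.replace (PySem.Str.lower (PySem.Str.strip name)) "-" "_") " " "_"

def collect_prefixed_profiles_py (prefix_ : String) (env : List (String × String)) : List (String × List (String × String)) :=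
  let prefix_upper := PySem.Str.upper prefix_
  let profiles : PySem.Dict String (PySem.Dict String String) :=
    env.foldl (fun profiles kv =>
      if ! PySem.Str.startswith kv.1 prefix_upper then profiles   -- continue
      else
        let remainder := PySem.Str.slice kv.1 (some (PySem.Str.len prefix_upper)) none
        if ! PySem.Str.isIn "_" remainder then profiles           -- continue
        else
          -- 'p, f = remainder.split('_', 1)': exactly 2 parts since '_' ∈ remainder
          let parts := (PySem.Str.splitMax? remainder "_" 1).getD []
          let profile_name := parts.getD 0 ""
          let field_name := parts.getD 1 ""
          -- profiles.setdefault(p, {})[f] = value  ==  profiles[p] = profiles.get(p, {}) with f ↦ value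
          profiles.modify (normalize_profile_name_py profile_name) PySem.Dict.empty
            (fun inner => inner.insert (PySem.Str.lower field_name) kv.2))
      PySem.Dict.empty
  profiles.items.map (fun p => (p.1, p.2.items))

-- ===== PORT B =====
-- _parse_profile_entry (B-side helper)
def parse_profile_entry_py (prefix_upper key value : String) : Option (String × String × String) :=
  if ! PySem.Str.startswith key prefix_upper then none
  else
    let remainder := PySem.Str.slice key (some (PySem.Str.len prefix_upper)) none
    if ! PySem.Str.isIn "_" remainder then none
    else
      -- 'name, field = remainder.split('_', 1)': exactly 2 parts since '_' ∈ remainder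
      let parts := (PySem.Str.splitMax? remainder "_" 1).getD []
      some (PySem.Str.replace (PySem.Str.replace (PySem.Str.lower (PySem.Str.strip (parts.getD 0 ""))) "-" "_") " " "_",
            PySem.Str.lower (parts.getD 1 ""), value)

def collect_prefixed_profiles_py_alt (prefix_ : String) (env : List (String × String)) : List (String × List (String × String)) :=
  let prefix_upper := PySem.Str.upper prefix_
  let triples := env.filterMap (fun kv => parse_profile_entry_py prefix_upper kv.1 kv.2)
  let names := PySem.List.dedup (triples.map (fun t => t.1))
  names.map (fun n =>
    (n, (PySem.Dict.ofList ((triples.filter (fun t => t.1 == n)).map (fun t => t.2))).items))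

-- ===== PRECONDITION & SPEC =====
def Spec_collect_prefixed_profiles_py (prefix_ : String) (env : List (String × String)) (out : List (String × List (String × String))) : Prop := out = collect_prefixed_profiles_py_alt prefix_ env
instance (prefix_ : String) (env : List (String × String)) (out : List (String × List (String × String))) : Decidable (Spec_collect_prefixed_profiles_py prefix_ env out) := by unfold Spec_collect_prefixed_profiles_py; infer_instance

-- ===== CLAIM (what is proved, stated in full; the proofs are below) =====
def Claim_equal_collect_prefixed_profiles_py : Prop := ∀ (prefix_ : String) (env : List (String × String)), Dom_collect_prefixed_profiles_py prefix_ env → Spec_collect_prefixed_profiles_py prefix_ env (collect_prefixed_profiles_py prefix_ env)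

-- ===== LEMMAS AND PROOFS =====

-- A's loop body is exactly 'update the dict by the parsed triple, if any'
lemma stepA_eq_parse (pu : String) (d : PySem.Dict String (PySem.Dict String String))
    (kv : String × String) :
    (if ! PySem.Str.startswith kv.1 pu then d
     else
       if ! PySem.Str.isIn "_" (PySem.Str.slice kv.1 (some (PySem.Str.len pu)) none) then d
       else
         d.modify (normalize_profile_name_py
             (((PySem.Str.splitMax? (PySem.Str.slice kv.1 (some (PySem.Str.len pu)) none) "_" 1).getD []).getD 0 ""))
           PySem.Dict.empty
           (fun inner => inner.insert
             (PySem.Str.lower (((PySem.Str.splitMax? (PySem.Str.slice kv.1 (some (PySem.Str.len pu)) none) "_" 1).getD []).getD 1 ""))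
             kv.2))
    = (match parse_profile_entry_py pu kv.1 kv.2 with
      | some t => d.modify t.1 PySem.Dict.empty (fun inner => inner.insert t.2.1 t.2.2)
      | none => d) := by
  unfold parse_profile_entry_py
  cases h1 : PySem.Str.startswith kv.1 pu
  · simp only [Bool.not_false, if_true]
  · simp only [Bool.not_true, Bool.false_eq_true, if_false]
    cases h2 : PySem.Str.isIn "_" (PySem.Str.slice kv.1 (some (PySem.Str.len pu)) none)
    · simp only [Bool.not_false, if_true]
    · simp only [Bool.not_true, Bool.false_eq_true, if_false, normalize_profile_name_py]

-- A's fold over env = fold of the parsed triples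
lemma foldA_eq_foldl_triples (pu : String) (env : List (String × String))
    (d : PySem.Dict String (PySem.Dict String String)) :
    env.foldl (fun profiles kv =>
      if ! PySem.Str.startswith kv.1 pu then profiles
      else
        let remainder := PySem.Str.slice kv.1 (some (PySem.Str.len pu)) none
        if ! PySem.Str.isIn "_" remainder then profiles
        else
          let parts := (PySem.Str.splitMax? remainder "_" 1).getD []
          let profile_name := parts.getD 0 ""
          let field_name := parts.getD 1 ""
          profiles.modify (normalize_profile_name_py profile_name) PySem.Dict.empty
            (fun inner => inner.insert (PySem.Str.lower field_name) kv.2)) d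
    = (env.filterMap (fun kv => parse_profile_entry_py pu kv.1 kv.2)).foldl
        (fun d t => d.modify t.1 PySem.Dict.empty (fun inner => inner.insert t.2.1 t.2.2)) d := by
  induction env generalizing d with
  | nil => rfl
  | cons kv rest ih =>
    simp only [List.foldl_cons, List.filterMap_cons]
    rw [stepA_eq_parse pu d kv]
    cases h : parse_profile_entry_py pu kv.1 kv.2 with
    | none => exact ih d
    | some t => exact ih _

-- per-profile content of the triple fold
lemma getD_foldl_triples (t : List (String × String × String))
    (d : PySem.Dict String (PySem.Dict String String)) (n : String) :
    (t.foldl (fun d x => d.modify x.1 PySem.Dict.empty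
        (fun inner => inner.insert x.2.1 x.2.2)) d).getD n PySem.Dict.empty
    = ((t.filter (fun x => x.1 == n)).map (fun x => x.2)).foldl
        (fun inner p => inner.insert p.1 p.2) (d.getD n PySem.Dict.empty) := by
  induction t generalizing d with
  | nil => rfl
  | cons x rest ih =>
    simp only [List.foldl_cons, List.filter_cons]
    by_cases h : x.1 = n
    · simp only [h, beq_self_eq_true, if_pos, List.map_cons, List.foldl_cons]
      rw [ih, PySem.Dict.getD_modify]
      simp
    · have hb : (x.1 == n) = false := by simp [h]
      simp only [hb, if_neg Bool.false_ne_true]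
      rw [ih, PySem.Dict.getD_modify]
      simp [Ne.symm h]

-- the whole grouped result of the triple fold
lemma foldl_triples_items (t : List (String × String × String)) :
    ((t.foldl (fun d x => d.modify x.1 PySem.Dict.empty
        (fun inner => inner.insert x.2.1 x.2.2)) PySem.Dict.empty).items).map
          (fun p => (p.1, p.2.items))
    = (PySem.List.dedup (t.map (fun x => x.1))).map (fun n =>
        (n, (PySem.Dict.ofList ((t.filter (fun x => x.1 == n)).map (fun x => x.2))).items)) := by
  have hkeys : (t.foldl (fun d x => d.modify x.1 PySem.Dict.empty
      (fun inner => inner.insert x.2.1 x.2.2)) PySem.Dict.empty).keys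
      = PySem.List.dedup (t.map (fun x => x.1)) := by
    have := PySem.Dict.keys_foldl_modify_key t (fun x => x.1) PySem.Dict.empty
      (fun _ x inner => inner.insert x.2.1 x.2.2) PySem.Dict.empty
    rw [this]
    simp only [PySem.Dict.keys_empty, PySem.List.dedup_eq_ofList]
    rfl
  have hnd : (t.foldl (fun d x => d.modify x.1 PySem.Dict.empty
      (fun inner => inner.insert x.2.1 x.2.2)) PySem.Dict.empty).keys.Nodup := by
    exact PySem.Dict.nodup_keys_foldl_modify_key t (fun x => x.1) PySem.Dict.empty
      (fun _ x inner => inner.insert x.2.1 x.2.2) PySem.Dict.empty (by simp [PySem.Dict.keys_empty])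
  rw [PySem.Dict.items_eq_map_keys _ hnd PySem.Dict.empty, hkeys, List.map_map]
  refine List.map_congr_left (fun n _ => ?_)
  simp only [Function.comp_apply]
  rw [getD_foldl_triples]
  rfl

-- ===== VERDICT (by name: the statement is the Claim_ definition above) =====
theorem collect_prefixed_profiles_py_spec : Claim_equal_collect_prefixed_profiles_py := by
  intro prefix_ env _
  show collect_prefixed_profiles_py prefix_ env = collect_prefixed_profiles_py_alt prefix_ env
  simp only [collect_prefixed_profiles_py, collect_prefixed_profiles_py_alt]
  rw [foldA_eq_foldl_triples, foldl_triples_items]
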